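-- pv_equiv track=rewrite | github.com/juwkim/boj | 백준/Silver/17615. 볼 모으기/볼 모으기.py | solve
-- ===== SOURCE A (Python) =====
-- def solve(c, l):
--     i = 0
--     while i < len(l) and l[i] == c:
--         i += 1
--     if i == len(l):
--         return 0
--     ans = 0
--     while i < len(l):
--         if l[i] == c:
--             ans += 1
--         i += 1
--     return ans
-- ===== SOURCE B (Python) =====
-- def solve(c, l):
--     lead = 0
--     while lead < len(l) and l[lead] == c:
--         lead += 1
--     return l.count(c) - lead
-- ===== Notes on version B (the rewrite author's own statement) =====
-- stated objective: simpler
-- what changed: B computes only the leading run length and returns the total count of c (via list.count) minus that run, eliminating A's second explicit suffix-counting loop and its empty-suffix special case; the counting happens in the C-level list.count instead of a Python loop.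
import Mathlib
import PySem

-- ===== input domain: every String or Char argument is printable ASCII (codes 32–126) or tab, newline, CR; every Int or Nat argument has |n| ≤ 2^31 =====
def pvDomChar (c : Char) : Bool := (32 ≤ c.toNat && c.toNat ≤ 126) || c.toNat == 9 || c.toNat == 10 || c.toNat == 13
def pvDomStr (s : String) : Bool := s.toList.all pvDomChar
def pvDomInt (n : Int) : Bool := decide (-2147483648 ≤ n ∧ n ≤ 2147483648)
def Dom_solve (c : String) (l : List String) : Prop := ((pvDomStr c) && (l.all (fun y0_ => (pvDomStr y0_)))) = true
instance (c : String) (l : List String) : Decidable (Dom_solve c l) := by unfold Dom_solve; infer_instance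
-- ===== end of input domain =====

-- B subtracts the leading run length from the total count instead of counting the suffix with a second loop.

-- ===== PORT A =====
-- first while loop: advance i past the leading run of c; we keep the suffix l[i:] instead of the index
def solveSkip (c : String) : List String → List String
  | [] => []
  | x :: xs => if x == c then solveSkip c xs else x :: xs

def solve (c : String) (l : List String) : Int :=
  let rest := solveSkip c l
  if rest = [] then 0
  else rest.foldl (fun ans x => if x == c then ans + 1 else ans) 0

-- ===== PORT B =====
-- lead = 0; while lead < len(l) and l[lead] == c: lead += 1
def leadLen (c : String) : List String → Int
  | [] => 0
  | x :: xs => if x == c then leadLen c xs + 1 else 0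

def solve_alt (c : String) (l : List String) : Int :=
  PySem.List.count l c - leadLen c l

-- ===== PRECONDITION & SPEC =====
def Spec_solve (c : String) (l : List String) (out : Int) : Prop := out = solve_alt c l
instance (c : String) (l : List String) (out : Int) : Decidable (Spec_solve c l out) := by unfold Spec_solve; infer_instance

-- ===== CLAIM (what is proved, stated in full; the proofs are below) =====
def Claim_equal_solve : Prop := ∀ (c : String) (l : List String), Dom_solve c l → Spec_solve c l (solve c l)

-- ===== LEMMAS AND PROOFS =====
lemma solve_eq (c : String) (l : List String) : solve c l = solve_alt c l := by
  induction l with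
  | nil => simp [solve, solve_alt, solveSkip, leadLen, PySem.List.count]
  | cons x xs ih =>
    by_cases hx : x == c
    · have h1 : solve c (x :: xs) = solve c xs := by
        unfold solve
        simp only [solveSkip, hx, if_pos]
      have h2 : solve_alt c (x :: xs) = solve_alt c xs := by
        simp [solve_alt, leadLen, hx, PySem.List.count_eq, List.count_cons,
          (by simpa using hx : x = c)]
      rw [h1, h2, ih]
    · unfold solve solve_alt
      simp only [solveSkip, hx, if_neg, Bool.false_eq_true, not_false_iff, reduceCtorEq, leadLen]
      rw [PySem.List.foldl_beq_add_one]
      simp [PySem.List.count_eq]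

-- ===== VERDICT (by name: the statement is the Claim_ definition above) =====
theorem solve_spec : Claim_equal_solve := by
  intro c l _
  unfold Spec_solve
  exact solve_eq c l
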